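-- pv_equiv track=rewrite | github.com/GAMES-105/GAMES-105 | lab1/bvh.py | bvh_channels_map
-- ===== SOURCE A (Python) =====
-- def bvh_channels_map(hierarchy):
--     """ BVH loader: return slicing width for each channel """
--     slice_indices = []
--     slice_idx = 0
--     for i, channel in enumerate(hierarchy["channels"]):
--         step = len(channel)
--         slice_indices.append((slice_idx, slice_idx + step))
--         slice_idx += step
--     return slice_indices
-- ===== SOURCE B (Python) =====
-- def bvh_channels_map(hierarchy):
--     """ BVH loader: return slicing width for each channel """
--     # First pass: cumulative offset boundaries [0, w0, w0+w1, ...]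
--     offs = [0]
--     for channel in hierarchy["channels"]:
--         offs.append(offs[-1] + len(channel))
--     # Second pass: pair consecutive boundaries.
--     return list(zip(offs, offs[1:]))
-- ===== Notes on version B (the rewrite author's own statement) =====
-- stated objective: alternative
-- what changed: B first builds the cumulative offset boundary list in one pass and then forms the slice pairs by zipping consecutive boundaries, instead of A's single loop that interleaves pair-appending with incrementing a running index.
import Mathlib
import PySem

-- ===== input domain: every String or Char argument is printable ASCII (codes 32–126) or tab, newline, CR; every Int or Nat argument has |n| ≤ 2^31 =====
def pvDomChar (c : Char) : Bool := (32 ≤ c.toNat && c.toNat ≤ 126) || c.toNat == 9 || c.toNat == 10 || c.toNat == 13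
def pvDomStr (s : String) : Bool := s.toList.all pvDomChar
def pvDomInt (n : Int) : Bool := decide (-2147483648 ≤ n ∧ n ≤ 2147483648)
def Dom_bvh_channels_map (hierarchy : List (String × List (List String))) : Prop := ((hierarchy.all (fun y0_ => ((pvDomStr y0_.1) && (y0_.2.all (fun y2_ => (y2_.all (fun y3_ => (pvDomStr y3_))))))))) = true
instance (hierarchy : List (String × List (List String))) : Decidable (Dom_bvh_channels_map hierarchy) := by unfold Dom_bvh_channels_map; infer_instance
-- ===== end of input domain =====

-- B separates boundary-table construction from pair formation (offsets then zip) instead of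
-- A's single loop interleaving append-and-increment; objective: alternative decomposition.

-- ===== PORT A =====
-- the loop: for channel in hierarchy["channels"]: append (idx, idx+len); idx += len
def bvh_channels_map (hierarchy : List (String × List (List String))) : List (Int × Int) :=
  match (PySem.Dict.mk hierarchy).get? "channels" with
  | none => []   -- Python raises KeyError here; excluded by Pre_
  | some channels =>
    (channels.foldl (fun (s : List (Int × Int) × Int) channel =>
        let step : Int := channel.length
        (s.1 ++ [(s.2, s.2 + step)], s.2 + step)) ([], 0)).1

-- ===== PORT B =====
def bvh_channels_map_alt (hierarchy : List (String × List (List String))) : List (Int × Int) :=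
  match (PySem.Dict.mk hierarchy).get? "channels" with
  | none => []   -- Python raises KeyError here; excluded by Pre_
  | some channels =>
    let offs : List Int := channels.foldl (fun offs channel =>
        offs ++ [(PySem.List.pyGet? offs (-1)).getD 0 + (channel.length : Int)]) [0]
    offs.zip (PySem.List.slice offs (some 1) none)

-- ===== PRECONDITION & SPEC =====
-- Pre_ excludes exactly the inputs where Python A raises KeyError ("channels" key absent).
def Pre_bvh_channels_map (hierarchy : List (String × List (List String))) : Prop :=
  ((PySem.Dict.mk hierarchy).get? "channels").isSome = true
instance (hierarchy : List (String × List (List String))) : Decidable (Pre_bvh_channels_map hierarchy) := by unfold Pre_bvh_channels_map; infer_instance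

def pvWitness_bvh_channels_map : (List (String × List (List String))) :=
  [("channels", [["Xposition"], ["Yrotation", "Zrotation"]])]

def Spec_bvh_channels_map (hierarchy : List (String × List (List String))) (out : List (Int × Int)) : Prop := out = bvh_channels_map_alt hierarchy
instance (hierarchy : List (String × List (List String))) (out : List (Int × Int)) : Decidable (Spec_bvh_channels_map hierarchy out) := by unfold Spec_bvh_channels_map; infer_instance

-- ===== CLAIM (what is proved, stated in full; the proofs are below) =====
def Claim_equal_bvh_channels_map : Prop := ∀ (hierarchy : List (String × List (List String))), Dom_bvh_channels_map hierarchy → Pre_bvh_channels_map hierarchy → Spec_bvh_channels_map hierarchy (bvh_channels_map hierarchy)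

-- ===== LEMMAS AND PROOFS =====

-- reference form: the slice pairs starting at offset idx
def pvG (chs : List (List String)) (idx : Int) : List (Int × Int) :=
  match chs with
  | [] => []
  | c :: cs => (idx, idx + (c.length : Int)) :: pvG cs (idx + (c.length : Int))

-- the offsets B appends after the seed, starting from running total x
def pvOffs (chs : List (List String)) (x : Int) : List Int :=
  match chs with
  | [] => []
  | c :: cs => (x + (c.length : Int)) :: pvOffs cs (x + (c.length : Int))

lemma foldA_eq_pvG (chs : List (List String)) (acc : List (Int × Int)) (idx : Int) :
    (chs.foldl (fun (s : List (Int × Int) × Int) channel =>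
        let step : Int := channel.length
        (s.1 ++ [(s.2, s.2 + step)], s.2 + step)) (acc, idx)).1 = acc ++ pvG chs idx := by
  induction chs generalizing acc idx with
  | nil => simp [pvG]
  | cons c cs ih => simp [pvG, ih, List.append_assoc]

lemma pyGet_last (l : List Int) (x : Int) :
    (PySem.List.pyGet? (l ++ [x]) (-1)).getD 0 = x := by
  simp [PySem.List.pyGet?, PySem.List.pyIdx?]

lemma foldB_eq_pvOffs (chs : List (List String)) (l : List Int) (x : Int) :
    chs.foldl (fun offs channel =>
        offs ++ [(PySem.List.pyGet? offs (-1)).getD 0 + (channel.length : Int)]) (l ++ [x])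
      = (l ++ [x]) ++ pvOffs chs x := by
  induction chs generalizing l x with
  | nil => simp [pvOffs]
  | cons c cs ih =>
    simp only [List.foldl_cons, pvOffs, pyGet_last]
    rw [show l ++ [x] ++ [x + (c.length : Int)] = (l ++ [x]) ++ [x + (c.length : Int)] from rfl,
        ih (l ++ [x]) (x + (c.length : Int))]
    simp [List.append_assoc]

lemma zip_offs_eq_pvG (chs : List (List String)) (idx : Int) :
    (idx :: pvOffs chs idx).zip (pvOffs chs idx) = pvG chs idx := by
  induction chs generalizing idx with
  | nil => simp [pvOffs, pvG]
  | cons c cs ih => simp [pvOffs, pvG, ih]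

-- ===== VERDICT (by name: the statement is the Claim_ definition above) =====
theorem bvh_channels_map_spec : Claim_equal_bvh_channels_map := by
  intro hierarchy _ hpre
  unfold Spec_bvh_channels_map bvh_channels_map bvh_channels_map_alt
  obtain ⟨chs, hchs⟩ := Option.isSome_iff_exists.mp hpre
  rw [hchs]
  have hB := foldB_eq_pvOffs chs [] 0
  simp only [List.nil_append] at hB
  simp only [hB, PySem.List.slice_from_one, List.cons_append, List.nil_append, List.tail_cons]
  rw [zip_offs_eq_pvG, foldA_eq_pvG chs [] 0, List.nil_append]
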